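-- pv_equiv track=rewrite | github.com/Armaan-Goel-NTU/SC2079-MDP | Algorithm/planner.py | to_commands
-- ===== SOURCE A (Python) =====
-- FC = 0
--
-- BC = 3
--
-- def to_commands(path, obstacle_index):
--     """
--     Converts a path into a list of commands.
--
--     Args:
--         path (list): The path to be converted.
--         obstacle_index (int): The index of the obstacle.
--
--     Returns:
--         list: A list of commands.
--
--     """
--     command_list = []
--     x = 0
--     while x < len(path):
--         if path[x] == FC or path[x] == BC:  # Forward Centre or Back Centre
--             # Combine all continuous Forward Centre or Back Centre commands into one
--             command = path[x]
--             c = 5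
--             for i in range(x + 1, len(path)):
--                 if path[i] == command:
--                     c += 5
--                     x += 1
--                 else:
--                     break
--             command_list.extend([command + 1, c])
--         else:  # Forward Right, Forward Left, Back Right, Back Left (Always 90 degrees)
--             command_list.extend([path[x] + 1, 90])
--         x += 1
--
--     # Stop at the goal state
--     command_list.extend([7, obstacle_index])
--     return command_list
-- ===== SOURCE B (Python) =====
-- FC = 0
--
-- BC = 3
--
-- def to_commands(path, obstacle_index):
--     commands = []
--     for v in path:
--         if (v == FC or v == BC) and len(commands) >= 2 and commands[-2] == v + 1:
--             commands[-1] += 5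
--         else:
--             commands.append(v + 1)
--             commands.append(5 if (v == FC or v == BC) else 90)
--     commands.append(7)
--     commands.append(obstacle_index)
--     return commands
-- ===== Notes on version B (the rewrite author's own statement) =====
-- stated objective: alternative
-- what changed: Replaced A's index-advancing while-loop with an inner lookahead scan over each FC/BC run by a single lookahead-free fold over the elements that merges into the last emitted command pair (commands[-1] += 5) when it carries the same FC/BC command, otherwise pushes a new pair.
import Mathlib
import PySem

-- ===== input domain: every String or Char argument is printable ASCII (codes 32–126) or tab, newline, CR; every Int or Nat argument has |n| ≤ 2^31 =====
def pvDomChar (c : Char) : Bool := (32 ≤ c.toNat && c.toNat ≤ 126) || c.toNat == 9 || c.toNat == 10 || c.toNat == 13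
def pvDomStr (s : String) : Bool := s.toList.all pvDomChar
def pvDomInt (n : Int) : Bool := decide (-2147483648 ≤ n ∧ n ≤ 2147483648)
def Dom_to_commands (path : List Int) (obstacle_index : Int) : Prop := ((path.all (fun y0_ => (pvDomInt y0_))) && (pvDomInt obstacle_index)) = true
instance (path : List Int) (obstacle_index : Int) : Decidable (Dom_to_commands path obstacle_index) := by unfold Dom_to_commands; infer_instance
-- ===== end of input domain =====

-- B replaces A's index-advancing while-loop with an inner lookahead run scan by a
-- lookahead-free fold that merges each FC/BC element into the last emitted command
-- pair when it matches, otherwise pushes a new pair (objective: alternative).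

-- ===== PORT A =====
-- inner 'for i in range(x+1, len(path)): if path[i]==command: c+=5; x+=1 else: break'
-- counted abstractly: number of consecutive elements equal to `command` starting at i
def pvRunCount (path : List Int) (command : Int) (i : Nat) : Nat :=
  if h : i < path.length then
    if path[i] = command then pvRunCount path command (i + 1) + 1 else 0
  else 0
termination_by path.length - i

-- the 'while x < len(path)' loop of A
def pvALoop (path : List Int) (x : Nat) : List Int :=
  if h : x < path.length then
    let v := path[x]
    if v = 0 ∨ v = 3 then
      let k := pvRunCount path v (x + 1)
      (v + 1) :: (5 + 5 * (k : Int)) :: pvALoop path (x + 1 + k)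
    else
      (v + 1) :: 90 :: pvALoop path (x + 1)
  else []
termination_by path.length - x
decreasing_by all_goals omega

def to_commands (path : List Int) (obstacle_index : Int) : List Int :=
  pvALoop path 0 ++ [7, obstacle_index]

-- ===== PORT B =====
-- the body of B's for-loop; the growing `commands` list is kept REVERSED so that
-- Python's append / commands[-1] += 5 / commands[-2] act on the head
-- (commands[-1] = acc.head, commands[-2] = acc.getD 1)
def pvBStep (acc : List Int) (v : Int) : List Int :=
  if (v = 0 ∨ v = 3) ∧ 2 ≤ acc.length ∧ acc.getD 1 0 = v + 1 then
    match acc with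
    | c :: rest => (c + 5) :: rest
    | [] => []
  else
    (if v = 0 ∨ v = 3 then (5 : Int) else 90) :: (v + 1) :: acc

def to_commands_alt (path : List Int) (obstacle_index : Int) : List Int :=
  (path.foldl pvBStep []).reverse ++ [7, obstacle_index]

-- ===== PRECONDITION & SPEC =====
def Spec_to_commands (path : List Int) (obstacle_index : Int) (out : List Int) : Prop := out = to_commands_alt path obstacle_index
instance (path : List Int) (obstacle_index : Int) (out : List Int) : Decidable (Spec_to_commands path obstacle_index out) := by unfold Spec_to_commands; infer_instance

-- ===== CLAIM (what is proved, stated in full; the proofs are below) =====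
def Claim_equal_to_commands : Prop := ∀ (path : List Int) (obstacle_index : Int), Dom_to_commands path obstacle_index → Spec_to_commands path obstacle_index (to_commands path obstacle_index)

-- ===== LEMMAS AND PROOFS =====

-- common shape both programs reduce to: structural run-length pass over the list
def pvCore (l : List Int) : List Int :=
  match l with
  | [] => []
  | v :: t =>
      if v = 0 ∨ v = 3 then
        (v + 1) :: (5 + 5 * ((t.takeWhile (fun a => a == v)).length : Int)) ::
          pvCore (t.dropWhile (fun a => a == v))
      else
        (v + 1) :: 90 :: pvCore t
termination_by l.length
decreasing_by
  · simp_wf; have := List.length_dropWhile_le (p := fun a => a == v) (l := t); omega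
  · simp_wf

theorem pvRunCount_eq (path : List Int) (command : Int) (i : Nat) :
    pvRunCount path command i = ((path.drop i).takeWhile (fun a => a == command)).length := by
  fun_induction pvRunCount path command i with
  | case1 i h heq ih =>
      rw [List.drop_eq_getElem_cons h, List.takeWhile_cons]
      simp [heq, ih]
  | case2 i h heq =>
      rw [List.drop_eq_getElem_cons h, List.takeWhile_cons]
      simp [heq]
  | case3 i h =>
      rw [List.drop_eq_nil_of_le (by omega)]
      simp

theorem pvDrop_takeWhile (l : List Int) (p : Int → Bool) :
    l.drop (l.takeWhile p).length = l.dropWhile p := by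
  induction l with
  | nil => simp
  | cons a t ih =>
      by_cases h : p a = true
      · simp [h, ih]
      · simp [h]

theorem pvALoop_eq_core (path : List Int) (x : Nat) :
    pvALoop path x = pvCore (path.drop x) := by
  fun_induction pvALoop path x with
  | case1 x h v hv k ih =>
      rw [List.drop_eq_getElem_cons h, pvCore]
      rw [if_pos hv]
      have hk : k = ((path.drop (x + 1)).takeWhile (fun a => a == path[x])).length :=
        pvRunCount_eq path path[x] (x + 1)
      have hdrop : path.drop (x + 1 + k) = (path.drop (x + 1)).dropWhile (fun a => a == path[x]) := by
        rw [hk, ← pvDrop_takeWhile (path.drop (x + 1)) (fun a => a == path[x]),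
          ← List.drop_drop]
      rw [← hdrop, ← hk, ih]
  | case2 x h v hv ih =>
      rw [List.drop_eq_getElem_cons h, pvCore, if_neg hv, ih]
  | case3 x h =>
      rw [List.drop_eq_nil_of_le (by omega)]
      simp [pvCore]

-- merging a whole run of equal FC/BC elements into the top pair, one element at a time
theorem pvFold_run (v : Int) (hv : v = 0 ∨ v = 3) :
    ∀ (s : List Int), (∀ a ∈ s, a = v) → ∀ (c : Int) (acc : List Int),
      s.foldl pvBStep (c :: (v + 1) :: acc) = (c + 5 * (s.length : Int)) :: (v + 1) :: acc := by
  intro s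
  induction s with
  | nil => intro _ c acc; simp
  | cons a t ih =>
      intro hs c acc
      have ha : a = v := hs a (by simp)
      have ht : ∀ b ∈ t, b = v := fun b hb => hs b (by simp [hb])
      subst ha
      have hstep : pvBStep (c :: (a + 1) :: acc) a = (c + 5) :: (a + 1) :: acc := by
        rw [pvBStep, if_pos ⟨hv, by simp, by simp⟩]
      rw [List.foldl_cons, hstep, ih ht]
      congr 1
      push_cast [List.length_cons]
      ring

theorem pvHead_dropWhile (p : Int → Bool) (l : List Int) (w : Int)
    (h : (l.dropWhile p).head? = some w) : p w = false := by
  induction l with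
  | nil => simp [List.dropWhile] at h
  | cons a t ih =>
      by_cases hp : p a = true
      · rw [List.dropWhile_cons_of_pos hp] at h; exact ih h
      · rw [List.dropWhile_cons_of_neg hp] at h
        simp at h
        subst h
        simpa using hp

-- the fold equals pvCore provided the top of acc cannot merge with l's first element
theorem pvFold_core :
    ∀ (l acc : List Int),
      (∀ v, l.head? = some v → (v = 0 ∨ v = 3) →
        ¬(2 ≤ acc.length ∧ acc.getD 1 0 = v + 1)) →
      (l.foldl pvBStep acc).reverse = acc.reverse ++ pvCore l := by
  intro l
  induction l using pvCore.induct with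
  | case1 => intro acc _; simp [pvCore]
  | case2 v t hv ih =>
      intro acc hg
      have hstep : pvBStep acc v = 5 :: (v + 1) :: acc := by
        rw [pvBStep.eq_def, if_neg (by exact fun h => hg v rfl hv ⟨h.2.1, h.2.2⟩), if_pos hv]
      have hsplit : t = t.takeWhile (fun a => a == v) ++ t.dropWhile (fun a => a == v) := by
        simp
      have hmem : ∀ a ∈ t.takeWhile (fun a => a == v), a = v := by
        intro a ha; simpa using List.mem_takeWhile_imp ha
      rw [List.foldl_cons, hstep]
      conv_lhs => rw [hsplit]
      rw [List.foldl_append, pvFold_run v hv _ hmem 5 acc]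
      rw [ih _ (by
        intro w hw hwsp
        rintro ⟨-, h2⟩
        have hne : w ≠ v := by
          have := pvHead_dropWhile (fun a => a == v) t w hw
          simpa using this
        simp at h2
        omega)]
      rw [pvCore, if_pos hv]
      simp
  | case3 v t hv ih =>
      intro acc hg
      have hstep : pvBStep acc v = 90 :: (v + 1) :: acc := by
        rw [pvBStep.eq_def, if_neg (by rintro ⟨h, -⟩; exact hv h), if_neg hv]
      rw [List.foldl_cons, hstep]
      rw [ih _ (by
        intro w hw hwsp
        rintro ⟨-, h2⟩
        simp at h2
        have : w = v := by omega
        exact hv (this ▸ hwsp))]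
      rw [pvCore, if_neg hv]
      simp

-- ===== VERDICT (by name: the statement is the Claim_ definition above) =====
theorem to_commands_spec : Claim_equal_to_commands := by
  intro path obstacle_index _
  unfold Spec_to_commands to_commands to_commands_alt
  rw [pvFold_core path [] (by intro v _ _ h; simp at h), pvALoop_eq_core, List.drop_zero]
  simp
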